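-- pv_equiv track=rewrite | github.com/joydipdutta001/pythonProblems | CodeChef/dsa_learning_series/code5-carvans.py | carvans
-- ===== SOURCE A (Python) =====
-- def carvans(ncars,carspeeds):
--     maxspeed = carspeeds[0]
--     count = 0
--     for i in range(1, len(carspeeds)):
--         if carspeeds[i] > maxspeed:
--             count += 1
--         else:
--             maxspeed = carspeeds[i]
--     return ncars - count
-- ===== SOURCE B (Python) =====
-- def carvans(ncars, carspeeds):
--     mins = carspeeds[:1]
--     for v in carspeeds[1:]:
--         mins.append(min(mins[-1], v))
--     count = sum(1 for i in range(1, len(carspeeds)) if carspeeds[i] > mins[i - 1])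
--     return ncars - count
-- ===== Notes on version B (the rewrite author's own statement) =====
-- stated objective: alternative
-- what changed: Replaces A's stateful single pass carrying a running minimum with a stateless counting pass that compares each car against min() of the prefix slice before it.
import Mathlib
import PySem

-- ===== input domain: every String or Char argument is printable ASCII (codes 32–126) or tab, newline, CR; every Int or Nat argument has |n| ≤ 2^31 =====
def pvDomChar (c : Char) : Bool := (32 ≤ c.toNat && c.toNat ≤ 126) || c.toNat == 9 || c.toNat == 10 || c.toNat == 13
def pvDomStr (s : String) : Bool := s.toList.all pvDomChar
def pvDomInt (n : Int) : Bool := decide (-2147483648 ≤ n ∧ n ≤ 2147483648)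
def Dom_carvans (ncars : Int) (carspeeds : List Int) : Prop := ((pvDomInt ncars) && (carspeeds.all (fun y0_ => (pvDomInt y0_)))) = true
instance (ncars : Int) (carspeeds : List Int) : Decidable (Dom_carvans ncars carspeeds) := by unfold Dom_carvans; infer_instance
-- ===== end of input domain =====

-- B replaces A's single stateful pass (running minimum + count in one loop) with a
-- two-pass decomposition: build a prefix-minimum table, then count by comparing
-- each car against the table entry before it (alternative decomposition, same O(n) cost).

-- ===== PORT A =====
def carvans (ncars : Int) (carspeeds : List Int) : Int :=
  match PySem.List.pyGet? carspeeds 0 with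
  | none => 0  -- Python raises IndexError here; excluded by Pre_carvans
  | some m0 =>
    let st := (PySem.List.pyRange 1 (carspeeds.length : Int) 1).foldl
      (fun (st : Int × Int) i =>
        let v := PySem.List.pyGetD carspeeds i 0
        if st.1 < v then (st.1, st.2 + 1) else (v, st.2))
      (m0, 0)
    ncars - st.2

-- ===== PORT B =====
def carvans_alt (ncars : Int) (carspeeds : List Int) : Int :=
  -- mins = carspeeds[:1]; for v in carspeeds[1:]: mins.append(min(mins[-1], v))
  let mins := (PySem.List.slice carspeeds (some 1) none).foldl
    (fun (ms : List Int) v => ms ++ [min (PySem.List.pyGetD ms (-1) 0) v])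
    (PySem.List.slice carspeeds none (some 1))
  let count := (PySem.List.pyRange 1 (carspeeds.length : Int) 1).foldl
    (fun (acc : Int) i =>
      acc + (if PySem.List.pyGetD mins (i - 1) 0 < PySem.List.pyGetD carspeeds i 0 then (1 : Int) else 0))
    0
  ncars - count

-- ===== PRECONDITION & SPEC =====
-- A reads carspeeds[0] first, so it raises IndexError exactly on the empty list; Pre_ excludes only that.
def Pre_carvans (ncars : Int) (carspeeds : List Int) : Prop := carspeeds ≠ []
instance (ncars : Int) (carspeeds : List Int) : Decidable (Pre_carvans ncars carspeeds) := by unfold Pre_carvans; infer_instance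
def pvWitness_carvans : Int × List Int := (3, [4, 2, 5, 1])

def Spec_carvans (ncars : Int) (carspeeds : List Int) (out : Int) : Prop := out = carvans_alt ncars carspeeds
instance (ncars : Int) (carspeeds : List Int) (out : Int) : Decidable (Spec_carvans ncars carspeeds out) := by unfold Spec_carvans; infer_instance

-- ===== CLAIM (what is proved, stated in full; the proofs are below) =====
def Claim_equal_carvans : Prop := ∀ (ncars : Int) (carspeeds : List Int), Dom_carvans ncars carspeeds → Pre_carvans ncars carspeeds → Spec_carvans ncars carspeeds (carvans ncars carspeeds)

-- ===== LEMMAS AND PROOFS =====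

-- A's fold step and B's fold step (B's reads the prefix-min table ms), named for the invariant lemma.
def pvStepA (xs : List Int) (st : Int × Int) (i : Int) : Int × Int :=
  let v := PySem.List.pyGetD xs i 0
  if st.1 < v then (st.1, st.2 + 1) else (v, st.2)

def pvStepB (xs ms : List Int) (acc : Int) (i : Int) : Int :=
  acc + (if PySem.List.pyGetD ms (i - 1) 0 < PySem.List.pyGetD xs i 0 then (1 : Int) else 0)

-- the mathematical prefix-min list: pvPM m t = [min m t₀, min m t₀ t₁, …]
def pvPM (m : Int) : List Int → List Int
  | [] => []
  | v :: t => min m v :: pvPM (min m v) t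

-- mins[-1] is the last element of the (nonempty) table being built
theorem pv_last (ms : List Int) (m : Int) (h : ms.getLast? = some m) :
    PySem.List.pyGetD ms (-1) 0 = m := by
  match ms with
  | [] => simp at h
  | a :: ms' =>
    simp [PySem.List.pyGetD, PySem.List.pyGet?, PySem.List.pyIdx?]
    rw [List.getLast?_eq_getElem?] at h
    simpa using h

-- B's first loop builds ms ++ pvPM m t when it starts from a table ending in m
theorem pv_build (t : List Int) : ∀ (ms : List Int) (m : Int), ms.getLast? = some m →
    t.foldl (fun (ms : List Int) v => ms ++ [min (PySem.List.pyGetD ms (-1) 0) v]) ms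
      = ms ++ pvPM m t := by
  induction t with
  | nil => intro ms m _; simp [pvPM]
  | cons v t ih =>
      intro ms m hlast
      simp only [List.foldl_cons, pv_last ms m hlast]
      rw [ih (ms ++ [min m v]) (min m v) (by simp)]
      simp [pvPM]

-- reading the table: entry k of pvPM x t is the minimum of x and the first k+1 elements of t
theorem pv_pm_getD (t : List Int) : ∀ (x : Int) (k : Nat), k < t.length →
    (pvPM x t).getD k 0 = (t.take (k + 1)).foldl min x := by
  induction t with
  | nil => intro x k hk; simp at hk
  | cons v t ih =>
      intro x k hk
      match k with
      | 0 => simp [pvPM]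
      | k + 1 =>
          have : k < t.length := by simpa using hk
          simp only [pvPM, List.getD_cons_succ, List.take_succ_cons, List.foldl_cons]
          exact ih (min x v) k this

-- Invariant: folding indices 1..k (xs = x :: t, k ≤ t.length) gives
-- first component = min of the first k+1 elements, second component = B's count
-- read off the table mins = x :: pvPM x t.
theorem pv_invariant (x : Int) (t : List Int) (k : Nat) (hk : k ≤ t.length) :
    (PySem.List.pyRange 1 (1 + (k : Int)) 1).foldl (pvStepA (x :: t)) (x, 0)
      = ((t.take k).foldl min x,
         (PySem.List.pyRange 1 (1 + (k : Int)) 1).foldl (pvStepB (x :: t) (x :: pvPM x t)) 0) := by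
  induction k with
  | zero => simp [PySem.List.pyRange_one_eq_nil]
  | succ k ih =>
      have hk' : k ≤ t.length := by omega
      have hsplit : PySem.List.pyRange 1 (1 + ((k : Int) + 1)) 1
          = PySem.List.pyRange 1 (1 + (k : Int)) 1 ++ [1 + (k : Int)] := by
        have := PySem.List.pyRange_one_succ_right (a := 1) (b := 1 + (k : Int)) (by omega)
        simpa [add_assoc] using this
      -- value of the car at the new index
      have hidx : PySem.List.pyGetD (x :: t) (1 + (k : Int)) 0 = t.getD k 0 := by
        have : (1 + (k : Int)) = ((k + 1 : Nat) : Int) := by push_cast; ring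
        rw [this, PySem.List.pyGetD_natCast]
        simp [List.getD]
      -- the table entry the new index compares against
      have htab : PySem.List.pyGetD (x :: pvPM x t) ((1 + (k : Int)) - 1) 0
          = (t.take k).foldl min x := by
        have : (1 + (k : Int)) - 1 = ((k : Nat) : Int) := by ring
        rw [this, PySem.List.pyGetD_natCast]
        match k, hk' with
        | 0, _ => simp
        | k + 1, hsk =>
            have hlt : k < t.length := by omega
            simpa [List.getD_cons_succ] using pv_pm_getD t x k hlt
      have htake : t.take (k + 1) = t.take k ++ [t.getD k 0] := by
        have hlt : k < t.length := by omega
        rw [List.take_add_one]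
        simp [List.getD, List.getElem?_eq_getElem hlt]
      push_cast
      rw [hsplit, List.foldl_append, List.foldl_append, ih hk']
      simp only [List.foldl_cons, List.foldl_nil]
      rw [htake, List.foldl_append]
      simp only [List.foldl_cons, List.foldl_nil]
      unfold pvStepA pvStepB
      rw [htab, hidx]
      by_cases h : (t.take k).foldl min x < t[k]?.getD 0
      · simp [List.getD, h, min_eq_left (le_of_lt h)]
      · simp [List.getD, h, min_eq_right (le_of_not_gt h)]

-- ===== VERDICT (by name: the statement is the Claim_ definition above) =====
theorem carvans_spec : Claim_equal_carvans := by
  intro ncars carspeeds _ hpre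
  unfold Spec_carvans carvans carvans_alt
  match carspeeds, hpre with
  | x :: t, _ =>
    have h0 : PySem.List.pyGet? (x :: t) 0 = some x := by
      simp [PySem.List.pyGet?, PySem.List.pyIdx?]
    rw [h0]
    -- B's first pass builds exactly the table x :: pvPM x t
    have hbuild : (PySem.List.slice (x :: t) (some 1) none).foldl
        (fun (ms : List Int) v => ms ++ [min (PySem.List.pyGetD ms (-1) 0) v])
        (PySem.List.slice (x :: t) none (some 1)) = x :: pvPM x t := by
      rw [PySem.List.slice_from_one]
      have h1 : PySem.List.slice (x :: t) none (some 1) = [x] := by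
        rw [show (1:Int) = ((1:Nat):Int) from rfl, PySem.List.slice_to_natCast]; simp
      rw [h1]
      simpa using pv_build t [x] x (by simp)
    have hlen : ((x :: t).length : Int) = 1 + (t.length : Int) := by
      simp [List.length_cons]; ring
    simp only [hbuild, hlen]
    have hA := pv_invariant x t t.length le_rfl
    show ncars - ((PySem.List.pyRange 1 (1 + (t.length : Int)) 1).foldl (pvStepA (x :: t)) (x, 0)).2
        = ncars - (PySem.List.pyRange 1 (1 + (t.length : Int)) 1).foldl (pvStepB (x :: t) (x :: pvPM x t)) 0
    rw [hA]
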